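-- pv_equiv track=rewrite | github.com/Circuit-Overtime/Image_Compression | master_encoders/free_size_encoder_decoder/free_size_grayscale.py | delta_decode_grey
-- ===== SOURCE A (Python) =====
-- def delta_decode_grey(data):
--     """Decodes delta encoded data. Lossless."""
--     if not data:
--         return []
--     # Data should be a list/tuple of integers (0-255) here
--     # If it arrives as bytes, convert first: data = list(data)
--     if isinstance(data, bytes):
--          data = list(data)
--
--     if not data: # Check again after potential conversion
--         return []
--
--     decoded = [data[0]]
--     last_decoded_value = data[0]
--     for i in range(1, len(data)):
--         delta_value = data[i]
--         next_value_sum = last_decoded_value + delta_value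
--         next_value_decoded = next_value_sum % 256
--         decoded.append(next_value_decoded)
--         last_decoded_value = next_value_decoded
--     return decoded
-- ===== SOURCE B (Python) =====
-- def _psums(xs):
--     """Prefix sums by divide and conquer: solve halves, then lift the right
--     half by the left half's total."""
--     if len(xs) <= 1:
--         return list(xs)
--     mid = len(xs) // 2
--     left = _psums(xs[:mid])
--     right = _psums(xs[mid:])
--     off = left[-1]
--     return left + [off + r for r in right]
--
-- def delta_decode_grey(data):
--     """Decodes delta encoded data. Lossless."""
--     if not data:
--         return []
--     if isinstance(data, bytes):
--         data = list(data)
--     if not data: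
--         return []
--     sums = _psums(data)
--     return [data[0]] + [s % 256 for s in sums[1:]]
-- ===== Notes on version B (the rewrite author's own statement) =====
-- stated objective: alternative
-- what changed: Replaces A's stateful left-to-right loop (carrying last_decoded_value and chaining a mod-256 reduction through every step) with a divide-and-conquer computation of raw prefix sums (solve each half recursively, lift the right half by the left half's total) followed by a separate pass reducing each later sum mod 256; correct because mod is a homomorphism over addition.
import Mathlib
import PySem

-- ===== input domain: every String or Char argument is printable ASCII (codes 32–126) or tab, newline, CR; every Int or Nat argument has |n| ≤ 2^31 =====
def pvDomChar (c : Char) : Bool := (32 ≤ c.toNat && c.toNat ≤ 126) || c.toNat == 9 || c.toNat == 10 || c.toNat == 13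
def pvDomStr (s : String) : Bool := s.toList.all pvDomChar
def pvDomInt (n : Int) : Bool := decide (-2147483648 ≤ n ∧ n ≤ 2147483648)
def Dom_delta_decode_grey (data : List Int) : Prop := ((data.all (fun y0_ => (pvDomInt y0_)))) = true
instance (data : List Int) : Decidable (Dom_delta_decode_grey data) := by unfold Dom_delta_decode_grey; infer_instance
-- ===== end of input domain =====

-- B replaces A's stateful mod-chaining loop with divide-and-conquer raw prefix sums plus a separate mod-256 pass; same values, different algorithm, objective 'alternative'.


-- ===== PORT A =====
-- A's loop: decoded = [data[0]]; for each later delta, append (last + delta) % 256 and update last.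
def deltaLoopA (t : List Int) (acc : List Int) (last : Int) : List Int :=
  match t with
  | [] => acc
  | d :: rest =>
      let nv := PySem.Int.mod (last + d) 256
      deltaLoopA rest (acc ++ [nv]) nv

def delta_decode_grey (data : List Int) : List Int :=
  match data with
  | [] => []
  | h :: t => deltaLoopA t [h] h

-- ===== PORT B =====
-- _psums: prefix sums by divide and conquer (solve halves, lift the right half by the
-- left half's total). Python's left[-1] is getLastD 0 here: left is never empty on any
-- reachable call (len(xs) >= 2 gives mid >= 1), so the default is never used.
def psumsB (xs : List Int) : List Int :=
  if _h : xs.length ≤ 1 then xs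
  else
    let mid := xs.length / 2
    let left := psumsB (xs.take mid)
    let right := psumsB (xs.drop mid)
    let off := left.getLastD 0
    left ++ right.map (fun r => off + r)
termination_by xs.length
decreasing_by
  · simp only [List.length_take]; omega
  · simp only [List.length_drop]; omega

-- B: sums = _psums(data); return [data[0]] + [s % 256 for s in sums[1:]]
def delta_decode_grey_alt (data : List Int) : List Int :=
  match data with
  | [] => []
  | h :: t =>
      h :: (PySem.List.slice (psumsB (h :: t)) (some 1) none).map
        (fun s => PySem.Int.mod s 256)

-- ===== PRECONDITION & SPEC =====
def Spec_delta_decode_grey (data : List Int) (out : List Int) : Prop := out = delta_decode_grey_alt data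
instance (data : List Int) (out : List Int) : Decidable (Spec_delta_decode_grey data out) := by unfold Spec_delta_decode_grey; infer_instance

-- ===== CLAIM (what is proved, stated in full; the proofs are below) =====
def Claim_equal_delta_decode_grey : Prop := ∀ (data : List Int), Dom_delta_decode_grey data → Spec_delta_decode_grey data (delta_decode_grey data)

-- ===== LEMMAS AND PROOFS =====

-- A's chained state equals the mod of the raw prefix sum: for any state 'last'
-- congruent to 'pref' mod 256, the loop appends mod (pref + sum of first (k+1)
-- elements of t) 256 for each k < t.length.
theorem deltaLoopA_eq (t : List Int) (acc : List Int) (last pref : Int)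
    (h : PySem.Int.mod last 256 = PySem.Int.mod pref 256) :
    deltaLoopA t acc last =
      acc ++ (List.range t.length).map
        (fun k => PySem.Int.mod (pref + (t.take (k + 1)).sum) 256) := by
  induction t generalizing acc last pref with
  | nil => simp [deltaLoopA]
  | cons d rest ih =>
      simp only [deltaLoopA]
      have hc : PySem.Int.mod (PySem.Int.mod (last + d) 256) 256
          = PySem.Int.mod (pref + d) 256 := by
        simp only [PySem.Int.mod_eq_emod_of_pos (show (0:Int) < 256 by norm_num)]
        have h' : last % 256 = pref % 256 := by
          simpa [PySem.Int.mod_eq_emod_of_pos (show (0:Int) < 256 by norm_num)] using h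
        omega
      have hhead : PySem.Int.mod (last + d) 256 = PySem.Int.mod (pref + d) 256 := by
        have h' : last % 256 = pref % 256 := by
          simpa [PySem.Int.mod_eq_emod_of_pos (show (0:Int) < 256 by norm_num)] using h
        simp only [PySem.Int.mod_eq_emod_of_pos (show (0:Int) < 256 by norm_num)]; omega
      rw [ih (acc ++ [PySem.Int.mod (last + d) 256]) (PySem.Int.mod (last + d) 256) (pref + d) hc,
        hhead, List.length_cons, List.range_succ_eq_map, List.map_cons, List.map_map]
      simp only [List.append_assoc, List.singleton_append, List.take_succ_cons, List.take_zero,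
        List.sum_cons, List.sum_nil, add_zero]
      congr 1
      congr 1
      apply List.map_congr_left
      intro k _
      simp only [Function.comp, Nat.succ_eq_add_one]
      congr 1
      ring

-- psumsB really is the list of raw prefix sums.
theorem psumsB_eq (xs : List Int) :
    psumsB xs = (List.range xs.length).map (fun k => (xs.take (k + 1)).sum) := by
  induction hn : xs.length using Nat.strong_induction_on generalizing xs with
  | _ n ih =>
    subst hn
    rw [psumsB]
    split
    · rename_i h
      match xs, h with
      | [], _ => simp
      | [x], _ => simp
    · rename_i h
      rw [not_le] at h
      have h2 : 2 ≤ xs.length := h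
      set n := xs.length with hnx
      set mid := n / 2 with hmid
      have hm1 : 1 ≤ mid := by omega
      have hmn : mid < n := by omega
      have hlt : (xs.take mid).length = mid := by simp; omega
      have hld : (xs.drop mid).length = n - mid := by simp [hnx]
      dsimp only
      rw [ih mid (by omega) (xs.take mid) hlt, ih (n - mid) (by omega) (xs.drop mid) hld]
      -- left elements are plain prefix sums of xs
      have hleft : (List.range mid).map (fun k => ((xs.take mid).take (k + 1)).sum)
          = (List.range mid).map (fun k => (xs.take (k + 1)).sum) := by
        apply List.map_congr_left
        intro k hk
        rw [List.mem_range] at hk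
        rw [List.take_take, min_eq_left (by omega)]
      rw [hleft]
      -- the offset (Python's left[-1]) is the sum of the first mid elements
      have hoff : (((List.range mid).map (fun k => (xs.take (k + 1)).sum)).getLastD 0)
          = (xs.take mid).sum := by
        obtain ⟨m, hm⟩ : ∃ m, mid = m + 1 := ⟨mid - 1, by omega⟩
        rw [hm, List.range_succ, List.map_append, List.map_cons, List.map_nil,
          List.getLastD_concat]
      rw [hoff]
      -- split range n at mid and merge the two halves
      have hsplit : List.range n = List.range mid ++ (List.range (n - mid)).map (mid + ·) := by
        conv_lhs => rw [show n = mid + (n - mid) by omega]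
        rw [List.range_add]
      rw [hsplit, List.map_append, List.map_map, List.map_map]
      congr 1
      apply List.map_congr_left
      intro k hk
      simp only [Function.comp]
      conv_rhs => rw [show mid + k + 1 = mid + (k + 1) by ring, List.take_add]
      rw [List.sum_append]

-- ===== VERDICT (by name: the statement is the Claim_ definition above) =====
theorem delta_decode_grey_spec : Claim_equal_delta_decode_grey := by
  intro data _
  unfold Spec_delta_decode_grey
  cases data with
  | nil => rfl
  | cons h t =>
      simp only [delta_decode_grey, delta_decode_grey_alt]
      rw [deltaLoopA_eq t [h] h h rfl, PySem.List.slice_from_one, psumsB_eq,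
        List.length_cons, List.range_succ_eq_map, List.map_cons, List.tail_cons, List.map_map,
        List.map_map]
      simp only [List.singleton_append, List.cons.injEq, true_and]
      apply List.map_congr_left
      intro k _
      simp only [Function.comp, Nat.succ_eq_add_one, List.take_succ_cons, List.sum_cons]
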